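-- pv_equiv track=rewrite | github.com/ws-researcher/CAEA | KGA/DataProcess.py | spilt_triples
-- ===== SOURCE A (Python) =====
-- def spilt_triples(ent_ent_triples: set, rel_id: dict):
--     typeIDSet = set()
--     typeIDSet.add(rel_id.get("http://www.w3.org/1999/02/22-rdf-syntax-ns#type"))
--     typeIDSet.add(rel_id.get("http://www.w3.org/2000/01/rdf-schema#subClassOf"))
--     typeIDSet.add(rel_id.get("http://dbpedia.org/ontology/type"))
--     typeIDSet.add(rel_id.get("http://www.wikidata.org/entity/P249"))
--     typeIDSet.add(rel_id.get("http://www.wikidata.org/entity/P31"))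
--     typeIDSet.add(rel_id.get("http://dbkwik.webdatacommons.org/memory-alpha.wikia.com/property/type"))
--     typeIDSet.add(rel_id.get("http://dbkwik.webdatacommons.org/memory-beta.wikia.com/property/type"))
--     typeIDSet.add(rel_id.get("label"))
--     typeIDSet.remove(None)
--
--     isAtriples = set()
--     NerTriples = set()
--     for triple in ent_ent_triples:
--         rel = int(triple[1])
--         if rel in typeIDSet:
--             isAtriples.add(triple)
--         else:
--             NerTriples.add(triple)
--
--     return isAtriples, NerTriples
-- ===== SOURCE B (Python) =====
-- _TYPE_KEYS = (
--     "http://www.w3.org/1999/02/22-rdf-syntax-ns#type",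
--     "http://www.w3.org/2000/01/rdf-schema#subClassOf",
--     "http://dbpedia.org/ontology/type",
--     "http://www.wikidata.org/entity/P249",
--     "http://www.wikidata.org/entity/P31",
--     "http://dbkwik.webdatacommons.org/memory-alpha.wikia.com/property/type",
--     "http://dbkwik.webdatacommons.org/memory-beta.wikia.com/property/type",
--     "label",
-- )
--
--
-- def spilt_triples(ent_ent_triples: set, rel_id: dict):
--     # No precomputed typeIDSet: each distinct predicate is classified once, on
--     # first encounter, by scanning the eight type-predicate URIs directly
--     # against rel_id.get; the verdicts are memoized in a predicate->bool dict.
--     side = {}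
--     isAtriples = set()
--     NerTriples = set()
--     for triple in ent_ent_triples:
--         rel = int(triple[1])
--         if rel not in side:
--             side[rel] = any(rel_id.get(k) == rel for k in _TYPE_KEYS)
--         if side[rel]:
--             isAtriples.add(triple)
--         else:
--             NerTriples.add(triple)
--     return isAtriples, NerTriples
-- ===== Notes on version B (the rewrite author's own statement) =====
-- stated objective: alternative
-- what changed: B builds no typeIDSet at all: instead of A's eight-get Option set with remove(None) followed by a per-triple membership test, B classifies each distinct predicate on first encounter by scanning the eight type URIs directly against rel_id.get, memoizes the verdict in a predicate->bool dict, and partitions by that memo in one ordered pass.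
-- crash fix: When all eight type-predicate URIs are keys of rel_id, A's typeIDSet.remove(None) raises KeyError; B simply returns the partition (isAtriples, NerTriples) there. — e.g. on spilt_triples(([(0, 1, 0), (0, 9, 0)], [("http://www.w3.org/1999/02/22-rdf-syntax-ns#type", 1), ("http://www.w3.org/2000/01/rdf-schem…): A raises KeyError, B returns ([(0, 1, 0)], [(0, 9, 0)])
import Mathlib
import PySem

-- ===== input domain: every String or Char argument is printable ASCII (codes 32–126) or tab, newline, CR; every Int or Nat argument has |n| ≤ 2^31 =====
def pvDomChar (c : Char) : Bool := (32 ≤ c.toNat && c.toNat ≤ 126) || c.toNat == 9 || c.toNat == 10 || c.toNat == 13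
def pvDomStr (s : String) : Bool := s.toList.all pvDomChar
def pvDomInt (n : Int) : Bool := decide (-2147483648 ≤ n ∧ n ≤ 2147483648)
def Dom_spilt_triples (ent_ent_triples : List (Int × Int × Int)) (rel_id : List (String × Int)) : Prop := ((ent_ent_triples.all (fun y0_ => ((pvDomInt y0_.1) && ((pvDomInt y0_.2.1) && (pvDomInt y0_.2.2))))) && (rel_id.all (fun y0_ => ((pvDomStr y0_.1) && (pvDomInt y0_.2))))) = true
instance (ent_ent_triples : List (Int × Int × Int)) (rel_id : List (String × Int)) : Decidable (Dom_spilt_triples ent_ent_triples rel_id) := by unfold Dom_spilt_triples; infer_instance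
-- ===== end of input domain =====

-- ===== PORT A =====
-- A: eight-get Option set + remove(None), then a dual-accumulating membership loop.
-- B: no type set — a predicate→bool memo dict filled by scanning the eight URIs via rel_id.get.
def pvKeys : List String :=
  ["http://www.w3.org/1999/02/22-rdf-syntax-ns#type",
   "http://www.w3.org/2000/01/rdf-schema#subClassOf",
   "http://dbpedia.org/ontology/type",
   "http://www.wikidata.org/entity/P249",
   "http://www.wikidata.org/entity/P31",
   "http://dbkwik.webdatacommons.org/memory-alpha.wikia.com/property/type",
   "http://dbkwik.webdatacommons.org/memory-beta.wikia.com/property/type",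
   "label"]

def spilt_triples (ent_ent_triples : List (Int × Int × Int)) (rel_id : List (String × Int)) : (List (Int × Int × Int)) × (List (Int × Int × Int)) :=
  let d : PySem.Dict String Int := PySem.Dict.mk rel_id
  let s0 : PySem.Set (Option Int) := PySem.Set.empty
  let s1 := PySem.Set.add s0 (PySem.Dict.get? d "http://www.w3.org/1999/02/22-rdf-syntax-ns#type")
  let s2 := PySem.Set.add s1 (PySem.Dict.get? d "http://www.w3.org/2000/01/rdf-schema#subClassOf")
  let s3 := PySem.Set.add s2 (PySem.Dict.get? d "http://dbpedia.org/ontology/type")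
  let s4 := PySem.Set.add s3 (PySem.Dict.get? d "http://www.wikidata.org/entity/P249")
  let s5 := PySem.Set.add s4 (PySem.Dict.get? d "http://www.wikidata.org/entity/P31")
  let s6 := PySem.Set.add s5 (PySem.Dict.get? d "http://dbkwik.webdatacommons.org/memory-alpha.wikia.com/property/type")
  let s7 := PySem.Set.add s6 (PySem.Dict.get? d "http://dbkwik.webdatacommons.org/memory-beta.wikia.com/property/type")
  let s8 := PySem.Set.add s7 (PySem.Dict.get? d "label")
  -- typeIDSet.remove(None): raises KeyError when none ∉ s8 (excluded by Pre_); getD is only reached under Pre_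
  let typeIDSet : PySem.Set (Option Int) := (PySem.Set.remove? s8 none).getD s8
  let res := ent_ent_triples.foldl
    (fun (p : PySem.Set (Int × Int × Int) × PySem.Set (Int × Int × Int)) triple =>
      let rel : Int := triple.2.1
      if PySem.Set.contains typeIDSet (some rel) then
        (PySem.Set.add p.1 triple, p.2)
      else
        (p.1, PySem.Set.add p.2 triple))
    (PySem.Set.empty, PySem.Set.empty)
  (res.1, res.2)

-- ===== PORT B =====
def spilt_triples_alt (ent_ent_triples : List (Int × Int × Int)) (rel_id : List (String × Int)) : (List (Int × Int × Int)) × (List (Int × Int × Int)) :=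
  let d : PySem.Dict String Int := PySem.Dict.mk rel_id
  let res := ent_ent_triples.foldl
    (fun (st : PySem.Dict Int Bool × PySem.Set (Int × Int × Int) × PySem.Set (Int × Int × Int)) triple =>
      let rel : Int := triple.2.1
      -- if rel not in side: side[rel] = any(rel_id.get(k) == rel for k in _TYPE_KEYS)
      let side :=
        if PySem.Dict.contains st.1 rel then st.1
        else PySem.Dict.insert st.1 rel (pvKeys.any (fun k => PySem.Dict.get? d k == some rel))
      if PySem.Dict.getD side rel false then
        (side, PySem.Set.add st.2.1 triple, st.2.2)
      else
        (side, st.2.1, PySem.Set.add st.2.2 triple))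
    (PySem.Dict.empty, PySem.Set.empty, PySem.Set.empty)
  (res.2.1, res.2.2)

-- ===== PRECONDITION & SPEC =====
-- Pre_ excludes exactly the inputs where A raises: rel_id containing ALL eight type-predicate keys,
-- so that rel_id.get never returns None and typeIDSet.remove(None) raises KeyError.
def Pre_spilt_triples (ent_ent_triples : List (Int × Int × Int)) (rel_id : List (String × Int)) : Prop :=
  ∃ k ∈ pvKeys, PySem.Dict.get? (PySem.Dict.mk rel_id) k = none
instance (ent_ent_triples : List (Int × Int × Int)) (rel_id : List (String × Int)) : Decidable (Pre_spilt_triples ent_ent_triples rel_id) := by unfold Pre_spilt_triples; infer_instance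

def pvWitness_spilt_triples : (List (Int × Int × Int)) × (List (String × Int)) :=
  ([(1, 2, 3), (4, 5, 6)], [("label", 5)])

-- When all eight type-predicate URIs are keys of rel_id, A's typeIDSet.remove(None) raises KeyError; B returns the partition.
def Raises_spilt_triples (ent_ent_triples : List (Int × Int × Int)) (rel_id : List (String × Int)) : Prop :=
  ∀ k ∈ pvKeys, (PySem.Dict.get? (PySem.Dict.mk rel_id) k).isSome
instance (ent_ent_triples : List (Int × Int × Int)) (rel_id : List (String × Int)) : Decidable (Raises_spilt_triples ent_ent_triples rel_id) := by unfold Raises_spilt_triples; infer_instance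

def pvRaiseWitness_spilt_triples : (List (Int × Int × Int)) × (List (String × Int)) :=
  ([(0, 1, 0), (0, 9, 0)],
   [("http://www.w3.org/1999/02/22-rdf-syntax-ns#type", 1),
    ("http://www.w3.org/2000/01/rdf-schema#subClassOf", 2),
    ("http://dbpedia.org/ontology/type", 3),
    ("http://www.wikidata.org/entity/P249", 4),
    ("http://www.wikidata.org/entity/P31", 5),
    ("http://dbkwik.webdatacommons.org/memory-alpha.wikia.com/property/type", 6),
    ("http://dbkwik.webdatacommons.org/memory-beta.wikia.com/property/type", 7),
    ("label", 8)])
def pvRaiseWitnessOut_spilt_triples : (List (Int × Int × Int)) × (List (Int × Int × Int)) :=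
  ([(0, 1, 0)], [(0, 9, 0)])

def Spec_spilt_triples (ent_ent_triples : List (Int × Int × Int)) (rel_id : List (String × Int)) (out : (List (Int × Int × Int)) × (List (Int × Int × Int))) : Prop := out = spilt_triples_alt ent_ent_triples rel_id
instance (ent_ent_triples : List (Int × Int × Int)) (rel_id : List (String × Int)) (out : (List (Int × Int × Int)) × (List (Int × Int × Int))) : Decidable (Spec_spilt_triples ent_ent_triples rel_id out) := by unfold Spec_spilt_triples; infer_instance

-- ===== CLAIM (what is proved, stated in full; the proofs are below) =====
def Claim_equal_spilt_triples : Prop := ∀ (ent_ent_triples : List (Int × Int × Int)) (rel_id : List (String × Int)), Dom_spilt_triples ent_ent_triples rel_id → Pre_spilt_triples ent_ent_triples rel_id → Spec_spilt_triples ent_ent_triples rel_id (spilt_triples ent_ent_triples rel_id)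
def Claim_raises_spilt_triples : Prop := (∀ (ent_ent_triples : List (Int × Int × Int)) (rel_id : List (String × Int)), Dom_spilt_triples ent_ent_triples rel_id → Raises_spilt_triples ent_ent_triples rel_id → ¬ Pre_spilt_triples ent_ent_triples rel_id) ∧ (Dom_spilt_triples (pvRaiseWitness_spilt_triples.1) (pvRaiseWitness_spilt_triples.2) ∧ Raises_spilt_triples (pvRaiseWitness_spilt_triples.1) (pvRaiseWitness_spilt_triples.2) ∧ spilt_triples_alt (pvRaiseWitness_spilt_triples.1) (pvRaiseWitness_spilt_triples.2) = pvRaiseWitnessOut_spilt_triples)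

-- ===== LEMMAS AND PROOFS =====
-- B's memoized fold, with a coherent memo, equals the plain dual-accumulating fold on condition c.
theorem pvMemoFold (c : Int → Bool) (ts : List (Int × Int × Int))
    (d0 : PySem.Dict Int Bool) (s1 s2 : PySem.Set (Int × Int × Int))
    (hco : ∀ r b, PySem.Dict.get? d0 r = some b → b = c r) :
    (ts.foldl
      (fun (st : PySem.Dict Int Bool × PySem.Set (Int × Int × Int) × PySem.Set (Int × Int × Int)) triple =>
        let rel : Int := triple.2.1
        let side :=
          if PySem.Dict.contains st.1 rel then st.1
          else PySem.Dict.insert st.1 rel (c rel)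
        if PySem.Dict.getD side rel false then
          (side, PySem.Set.add st.2.1 triple, st.2.2)
        else
          (side, st.2.1, PySem.Set.add st.2.2 triple))
      (d0, s1, s2)).2
    = ts.foldl
        (fun (p : PySem.Set (Int × Int × Int) × PySem.Set (Int × Int × Int)) triple =>
          if c triple.2.1 then (PySem.Set.add p.1 triple, p.2)
          else (p.1, PySem.Set.add p.2 triple))
        (s1, s2) := by
  induction ts generalizing d0 s1 s2 with
  | nil => rfl
  | cons t ts ih =>
    simp only [List.foldl_cons]
    set r : Int := t.2.1 with hr
    by_cases hc : PySem.Dict.contains d0 r = true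
    · have hsome : (PySem.Dict.get? d0 r).isSome := by
        rw [← PySem.Dict.contains_eq_isSome_get?]; exact hc
      obtain ⟨b, hb⟩ := Option.isSome_iff_exists.mp hsome
      have hbc : b = c r := hco r b hb
      have hget : PySem.Dict.getD d0 r false = c r := by
        rw [PySem.Dict.getD_eq_get?_getD, hb, Option.getD_some, hbc]
      simp only [hc, if_true, hget]
      by_cases hcr : c r = true
      · rw [if_pos hcr, if_pos hcr]; exact ih d0 _ _ hco
      · rw [if_neg hcr, if_neg hcr]; exact ih d0 _ _ hco
    · have hget : PySem.Dict.getD (PySem.Dict.insert d0 r (c r)) r false = c r := by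
        rw [PySem.Dict.getD_insert_self]
      have hco' : ∀ r' b', PySem.Dict.get? (PySem.Dict.insert d0 r (c r)) r' = some b' → b' = c r' := by
        intro r' b' h
        by_cases hrr : r' = r
        · subst hrr
          rw [PySem.Dict.get?_insert_self] at h
          exact (Option.some_inj.mp h).symm
        · simp only [PySem.Dict.get?_insert, if_neg hrr] at h
          exact hco r' b' h
      simp only [hc, if_false, Bool.false_eq_true, hget]
      by_cases hcr : c r = true
      · rw [if_pos hcr, if_pos hcr]; exact ih _ _ _ hco'
      · rw [if_neg hcr, if_neg hcr]; exact ih _ _ _ hco'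

-- ===== VERDICT =====
theorem spilt_triples_spec : Claim_equal_spilt_triples := by
  intro ts rel _ hpre
  unfold Spec_spilt_triples spilt_triples spilt_triples_alt
  dsimp only
  obtain ⟨k0, hk0, hnone⟩ := hpre
  set d : PySem.Dict String Int := PySem.Dict.mk rel with hd
  set s8 : PySem.Set (Option Int) :=
    PySem.Set.add (PySem.Set.add (PySem.Set.add (PySem.Set.add (PySem.Set.add (PySem.Set.add (PySem.Set.add (PySem.Set.add PySem.Set.empty
      (PySem.Dict.get? d "http://www.w3.org/1999/02/22-rdf-syntax-ns#type"))
      (PySem.Dict.get? d "http://www.w3.org/2000/01/rdf-schema#subClassOf"))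
      (PySem.Dict.get? d "http://dbpedia.org/ontology/type"))
      (PySem.Dict.get? d "http://www.wikidata.org/entity/P249"))
      (PySem.Dict.get? d "http://www.wikidata.org/entity/P31"))
      (PySem.Dict.get? d "http://dbkwik.webdatacommons.org/memory-alpha.wikia.com/property/type"))
      (PySem.Dict.get? d "http://dbkwik.webdatacommons.org/memory-beta.wikia.com/property/type"))
      (PySem.Dict.get? d "label") with hs8
  have hmem8 : ∀ v : Option Int, v ∈ s8 ↔ ∃ k ∈ pvKeys, PySem.Dict.get? d k = v := by
    intro v
    rw [hs8]
    simp only [PySem.Set.mem_add, pvKeys, List.mem_cons, List.not_mem_nil, PySem.Set.empty]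
    constructor
    · intro h
      rcases h with ((((((((h | h) | h) | h) | h) | h) | h) | h) | h)
      all_goals first
        | simp at h
        | exact ⟨_, by simp, h.symm⟩
    · rintro ⟨k, hk, hv⟩
      rcases hk with rfl | rfl | rfl | rfl | rfl | rfl | rfl | rfl | h
      · exact Or.inl (Or.inl (Or.inl (Or.inl (Or.inl (Or.inl (Or.inl (Or.inr hv.symm)))))))
      · exact Or.inl (Or.inl (Or.inl (Or.inl (Or.inl (Or.inl (Or.inr hv.symm))))))
      · exact Or.inl (Or.inl (Or.inl (Or.inl (Or.inl (Or.inr hv.symm)))))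
      · exact Or.inl (Or.inl (Or.inl (Or.inl (Or.inr hv.symm))))
      · exact Or.inl (Or.inl (Or.inl (Or.inr hv.symm)))
      · exact Or.inl (Or.inl (Or.inr hv.symm))
      · exact Or.inl (Or.inr hv.symm)
      · exact Or.inr hv.symm
      · simp at h
  have hnmem : (none : Option Int) ∈ s8 := (hmem8 none).2 ⟨k0, hk0, hnone⟩
  rw [PySem.Set.remove?_of_mem hnmem, Option.getD_some]
  -- the shared per-predicate condition
  have hcond : ∀ r : Int,
      PySem.Set.contains (PySem.Set.discard s8 none) (some r)
        = pvKeys.any (fun k => PySem.Dict.get? d k == some r) := by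
    intro r
    rw [Bool.eq_iff_iff, PySem.Set.contains_iff, PySem.Set.mem_discard, hmem8,
      List.any_eq_true]
    constructor
    · rintro ⟨⟨k, hk, hv⟩, _⟩
      exact ⟨k, hk, by simp [hv]⟩
    · rintro ⟨k, hk, hv⟩
      exact ⟨⟨k, hk, by simpa using hv⟩, by simp⟩
  -- A's fold becomes the plain dual fold on that condition
  rw [show (fun (p : PySem.Set (Int × Int × Int) × PySem.Set (Int × Int × Int)) (triple : Int × Int × Int) =>
        if PySem.Set.contains (PySem.Set.discard s8 none) (some triple.2.1) then
          (PySem.Set.add p.1 triple, p.2)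
        else (p.1, PySem.Set.add p.2 triple))
      = (fun (p : PySem.Set (Int × Int × Int) × PySem.Set (Int × Int × Int)) (triple : Int × Int × Int) =>
        if pvKeys.any (fun k => PySem.Dict.get? d k == some triple.2.1) then
          (PySem.Set.add p.1 triple, p.2)
        else (p.1, PySem.Set.add p.2 triple)) from by
      funext p t; rw [hcond t.2.1]]
  -- B's memoized fold collapses to the same plain fold (empty memo is coherent)
  have hB := pvMemoFold (fun r => pvKeys.any (fun k => PySem.Dict.get? d k == some r)) ts
    PySem.Dict.empty PySem.Set.empty PySem.Set.empty
    (by intro r b h; rw [PySem.Dict.get?_empty] at h; cases h)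
  exact (congrArg (fun q => (q.1, q.2)) hB).symm

def spilt_triples_raises : Claim_raises_spilt_triples := by
  unfold Claim_raises_spilt_triples
  constructor
  · intro ts rel _ hall hpre
    obtain ⟨k, hk, hnone⟩ := hpre
    have := hall k hk
    simp [hnone] at this
  · refine ⟨by decide, by decide, by decide⟩
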